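-- pv_equiv track=rewrite | github.com/chazeon/docxlate | src/docxlate/extensions/bibliography/artifacts/bbl.py | _preserve_tex_text
-- ===== SOURCE A (Python) =====
-- def _preserve_tex_text(value: str) -> str:
--     # Keep TeX tokens intact so bibliography rendering can flow through the
--     # regular parser/emitter pipeline without broad lossy normalization.
--     # Normalize only spacing/control macros that should not remain symbolic.
--     text = str(value).strip()
--     replacements = {
--         "\\bibinitperiod": ".",
--         "\\bibnamedelima": " ",
--         "\\bibinitdelim": " ",
--         "\\bibinithyphendelim": "-",
--     }
--     for src, dst in replacements.items():
--         text = text.replace(src, dst)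
--     return text
-- ===== SOURCE B (Python) =====
-- def _preserve_tex_text(value: str) -> str:
--     # Single left-to-right pass with a dispatch on the macro names,
--     # instead of four independent full-string .replace passes.
--     text = str(value).strip()
--     table = (
--         ("\\bibinitperiod", "."),
--         ("\\bibnamedelima", " "),
--         ("\\bibinitdelim", " "),
--         ("\\bibinithyphendelim", "-"),
--     )
--     out = []
--     i = 0
--     n = len(text)
--     while i < n:
--         if text[i] == "\\":
--             for src, dst in table:
--                 if text.startswith(src, i):
--                     out.append(dst)
--                     i += len(src)
--                     break
--             else:
--                 out.append(text[i])
--                 i += 1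
--         else:
--             out.append(text[i])
--             i += 1
--     return "".join(out)
-- ===== Notes on version B (the rewrite author's own statement) =====
-- stated objective: alternative
-- what changed: Replaces four sequential full-string str.replace passes by one left-to-right scan that dispatches on the macro name at each backslash and copies all other characters, building the output once.
import Mathlib
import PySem

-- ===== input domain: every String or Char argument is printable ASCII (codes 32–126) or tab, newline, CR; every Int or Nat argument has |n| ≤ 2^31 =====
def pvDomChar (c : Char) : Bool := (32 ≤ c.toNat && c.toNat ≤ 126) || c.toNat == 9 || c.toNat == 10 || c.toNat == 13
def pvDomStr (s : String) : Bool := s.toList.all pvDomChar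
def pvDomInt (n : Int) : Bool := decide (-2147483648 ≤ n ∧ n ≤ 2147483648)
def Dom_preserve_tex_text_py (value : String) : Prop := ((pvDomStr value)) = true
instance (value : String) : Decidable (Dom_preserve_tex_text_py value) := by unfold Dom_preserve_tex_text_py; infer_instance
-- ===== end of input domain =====

-- B replaces A's four sequential full-string .replace passes by one left-to-right
-- scan dispatching on the macro name at each backslash (objective: alternative).
set_option maxRecDepth 4096


-- ===== PORT A =====
-- text = str(value).strip(); then a loop over the dict's items applying text.replace(src, dst)
def preserve_tex_text_py (value : String) : String :=
  let text := PySem.Str.strip value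
  let replacements : List (String × String) :=
    [("\\bibinitperiod", "."), ("\\bibnamedelima", " "),
     ("\\bibinitdelim", " "), ("\\bibinithyphendelim", "-")]
  replacements.foldl (fun text p => PySem.Str.replace text p.1 p.2) text

-- ===== PORT B =====
-- the four macro names as char lists (B's dispatch table)
def pvMac1 : List Char := "\\bibinitperiod".toList
def pvMac2 : List Char := "\\bibnamedelima".toList
def pvMac3 : List Char := "\\bibinitdelim".toList
def pvMac4 : List Char := "\\bibinithyphendelim".toList

-- B's while-loop: one pass; at a backslash try the four macros in table order, else copy the char
def pvScan : List Char → List Char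
  | [] => []
  | c :: t =>
    if c = '\\' then
      if pvMac1.isPrefixOf (c :: t) then '.' :: pvScan (t.drop 13)
      else if pvMac2.isPrefixOf (c :: t) then ' ' :: pvScan (t.drop 13)
      else if pvMac3.isPrefixOf (c :: t) then ' ' :: pvScan (t.drop 12)
      else if pvMac4.isPrefixOf (c :: t) then '-' :: pvScan (t.drop 18)
      else c :: pvScan t
    else c :: pvScan t
termination_by l => l.length
decreasing_by all_goals simp [List.length_drop]

def preserve_tex_text_py_alt (value : String) : String :=
  String.ofList (pvScan (PySem.Chars.strip value.toList))

-- ===== PRECONDITION & SPEC =====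
def Spec_preserve_tex_text_py (value : String) (out : String) : Prop := out = preserve_tex_text_py_alt value
instance (value : String) (out : String) : Decidable (Spec_preserve_tex_text_py value out) := by unfold Spec_preserve_tex_text_py; infer_instance

-- ===== CLAIM (what is proved, stated in full; the proofs are below) =====
def Claim_equal_preserve_tex_text_py : Prop := ∀ (value : String), Dom_preserve_tex_text_py value → Spec_preserve_tex_text_py value (preserve_tex_text_py value)

-- ===== LEMMAS AND PROOFS =====

-- a fuel-free reformulation of PySem.Chars.replace (for nonempty `old`)
def pvRepl (old new : List Char) : List Char → List Char
  | [] => []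
  | c :: t =>
    if old.isPrefixOf (c :: t) then new ++ pvRepl old new (t.drop (old.length - 1))
    else c :: pvRepl old new t
termination_by l => l.length
decreasing_by all_goals simp [List.length_drop]

theorem pvGo_eq (old new : List Char) (hold : old ≠ []) :
    ∀ fuel l acc, l.length ≤ fuel →
      PySem.Chars.replace.go old new fuel l acc = acc.reverse ++ pvRepl old new l := by
  intro fuel
  induction fuel with
  | zero =>
    intro l acc h
    have : l = [] := by cases l <;> simp_all
    subst this
    simp [PySem.Chars.replace.go, pvRepl]
  | succ n ih =>
    intro l acc h
    cases l with
    | nil => simp [PySem.Chars.replace.go, pvRepl]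
    | cons c t =>
      by_cases hp : old.isPrefixOf (c :: t) = true
      · have hlen : old.length ≤ (c :: t).length :=
          (List.isPrefixOf_iff_prefix.mp hp).length_le
        have holdpos : 0 < old.length := by cases old <;> simp_all
        rw [PySem.Chars.replace.go]
        simp only [hp, if_pos]
        rw [ih]
        · rw [pvRepl]
          simp only [hp, if_pos]
          have : List.drop old.length (c :: t) = t.drop (old.length - 1) := by
            cases old with
            | nil => simp_all
            | cons o os => simp
          rw [this, List.reverse_append, List.reverse_reverse, List.append_assoc]
        · simp only [List.length_drop]
          simp at h hlen ⊢
          omega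
      · rw [PySem.Chars.replace.go]
        simp only [hp]
        rw [ih t (c :: acc) (by simp at h ⊢; omega)]
        rw [pvRepl]
        simp [hp]

theorem pvReplace_eq (old new l : List Char) (hold : old ≠ []) :
    PySem.Chars.replace l old new = pvRepl old new l := by
  rw [PySem.Chars.replace]
  have : old.isEmpty = false := by cases old <;> simp_all
  rw [this]
  simp only [Bool.false_eq_true, if_false]
  simpa using pvGo_eq old new hold l.length l [] le_rfl

-- stepping over a non-matching head character
theorem pvRepl_step (old new : List Char) (c : Char) (t : List Char)
    (h : old.isPrefixOf (c :: t) = false) :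
    pvRepl old new (c :: t) = c :: pvRepl old new t := by
  rw [pvRepl]; simp [h]

-- pushing a replace over a block of non-backslash characters
theorem pvRepl_push (p new q rest : List Char) (hq : ∀ a ∈ q, a ≠ '\\') :
    pvRepl ('\\' :: p) new (q ++ rest) = q ++ pvRepl ('\\' :: p) new rest := by
  induction q with
  | nil => simp
  | cons a q' ih =>
    have ha : a ≠ '\\' := hq a (by simp)
    have : ('\\' :: p).isPrefixOf (a :: (q' ++ rest)) = false := by
      simp [List.isPrefixOf]; intro h; exact absurd h.symm ha
    rw [List.cons_append, pvRepl_step _ _ _ _ this, ih (fun a ha => hq a (by simp [ha]))]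
    simp

-- a replace with a single-char replacement cannot create a prefix avoiding '\' and that char
theorem pvRepl_pfx (p : List Char) (nc : Char) :
    ∀ t w, '\\' ∉ w → nc ∉ w →
      List.isPrefixOf w (pvRepl ('\\' :: p) [nc] t) = true → List.isPrefixOf w t = true := by
  intro t
  induction t with
  | nil => intro w _ _ h; rw [pvRepl] at h; exact h
  | cons c t' ih =>
    intro w hb hn h
    cases w with
    | nil => simp
    | cons a w' =>
      by_cases hp : ('\\' :: p).isPrefixOf (c :: t') = true
      · rw [pvRepl] at h
        simp only [hp, if_pos] at h
        simp only [List.singleton_append, List.isPrefixOf] at h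
        have : a = nc := by
          rcases Bool.and_eq_true _ _ |>.mp h with ⟨h1, _⟩
          exact eq_of_beq h1
        exact absurd (this ▸ List.mem_cons_self) hn
      · rw [pvRepl_step _ _ _ _ (Bool.eq_false_iff.mpr hp)] at h
        simp only [List.isPrefixOf] at h ⊢
        rcases Bool.and_eq_true _ _ |>.mp h with ⟨h1, h2⟩
        refine Bool.and_eq_true _ _ |>.mpr ⟨h1, ?_⟩
        exact ih w' (fun hm => hb (by simp [hm])) (fun hm => hn (by simp [hm])) h2

-- abbreviations for the four replace passes
def pvR1 (l : List Char) : List Char := pvRepl pvMac1 ['.'] l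
def pvR2 (l : List Char) : List Char := pvRepl pvMac2 [' '] l
def pvR3 (l : List Char) : List Char := pvRepl pvMac3 [' '] l
def pvR4 (l : List Char) : List Char := pvRepl pvMac4 ['-'] l

-- the four macros split as backslash + tail (tails contain no backslash)
def pvT1 : List Char := "bibinitperiod".toList
def pvT2 : List Char := "bibnamedelima".toList
def pvT3 : List Char := "bibinitdelim".toList
def pvT4 : List Char := "bibinithyphendelim".toList

theorem pvMac1_cons : pvMac1 = '\\' :: pvT1 := rfl
theorem pvMac2_cons : pvMac2 = '\\' :: pvT2 := rfl
theorem pvMac3_cons : pvMac3 = '\\' :: pvT3 := rfl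
theorem pvMac4_cons : pvMac4 = '\\' :: pvT4 := rfl

-- matching the pattern itself
theorem pvRepl_match (p new rest : List Char) (hp : p ≠ []) :
    pvRepl p new (p ++ rest) = new ++ pvRepl p new rest := by
  cases p with
  | nil => exact absurd rfl hp
  | cons o os =>
    rw [List.cons_append, pvRepl]
    have hpre : (o :: os).isPrefixOf (o :: (os ++ rest)) = true :=
      List.isPrefixOf_iff_prefix.mpr ⟨rest, by simp⟩
    simp only [hpre, if_pos]
    congr 1
    have : (o :: os).length - 1 = os.length := by simp
    rw [this, List.drop_left]

-- stepping over a non-backslash head character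
theorem pvStep_nb (p new : List Char) (d : Char) (X : List Char) (hd : d ≠ '\\') :
    pvRepl ('\\' :: p) new (d :: X) = d :: pvRepl ('\\' :: p) new X := by
  refine pvRepl_step _ _ _ _ ?_
  simp [List.isPrefixOf]
  intro h; exact absurd h.symm hd

theorem pvStep1 (d : Char) (X : List Char) (hd : d ≠ '\\') :
    pvRepl pvMac1 ['.'] (d :: X) = d :: pvRepl pvMac1 ['.'] X := by
  rw [pvMac1_cons]; exact pvStep_nb _ _ _ _ hd
theorem pvStep2 (d : Char) (X : List Char) (hd : d ≠ '\\') :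
    pvRepl pvMac2 [' '] (d :: X) = d :: pvRepl pvMac2 [' '] X := by
  rw [pvMac2_cons]; exact pvStep_nb _ _ _ _ hd
theorem pvStep3 (d : Char) (X : List Char) (hd : d ≠ '\\') :
    pvRepl pvMac3 [' '] (d :: X) = d :: pvRepl pvMac3 [' '] X := by
  rw [pvMac3_cons]; exact pvStep_nb _ _ _ _ hd
theorem pvStep4 (d : Char) (X : List Char) (hd : d ≠ '\\') :
    pvRepl pvMac4 ['-'] (d :: X) = d :: pvRepl pvMac4 ['-'] X := by
  rw [pvMac4_cons]; exact pvStep_nb _ _ _ _ hd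

-- an earlier pass leaves a different macro occurrence intact (mismatch within the shorter macro)
theorem pvPass12 (X : List Char) :
    pvRepl pvMac1 ['.'] (pvMac2 ++ X) = pvMac2 ++ pvRepl pvMac1 ['.'] X := by
  rw [pvMac2_cons, List.cons_append,
      pvMac1_cons, pvRepl_step _ _ _ _ (by simp [pvT1, pvT2, List.isPrefixOf]),
      pvRepl_push _ _ _ _ (by simp [pvT2])]
  rfl
theorem pvPass13 (X : List Char) :
    pvRepl pvMac1 ['.'] (pvMac3 ++ X) = pvMac3 ++ pvRepl pvMac1 ['.'] X := by
  rw [pvMac3_cons, List.cons_append,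
      pvMac1_cons, pvRepl_step _ _ _ _ (by simp [pvT1, pvT3, List.isPrefixOf]),
      pvRepl_push _ _ _ _ (by simp [pvT3])]
  rfl
theorem pvPass14 (X : List Char) :
    pvRepl pvMac1 ['.'] (pvMac4 ++ X) = pvMac4 ++ pvRepl pvMac1 ['.'] X := by
  rw [pvMac4_cons, List.cons_append,
      pvMac1_cons, pvRepl_step _ _ _ _ (by simp [pvT1, pvT4, List.isPrefixOf]),
      pvRepl_push _ _ _ _ (by simp [pvT4])]
  rfl
theorem pvPass23 (X : List Char) :
    pvRepl pvMac2 [' '] (pvMac3 ++ X) = pvMac3 ++ pvRepl pvMac2 [' '] X := by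
  rw [pvMac3_cons, List.cons_append,
      pvMac2_cons, pvRepl_step _ _ _ _ (by simp [pvT2, pvT3, List.isPrefixOf]),
      pvRepl_push _ _ _ _ (by simp [pvT3])]
  rfl
theorem pvPass24 (X : List Char) :
    pvRepl pvMac2 [' '] (pvMac4 ++ X) = pvMac4 ++ pvRepl pvMac2 [' '] X := by
  rw [pvMac4_cons, List.cons_append,
      pvMac2_cons, pvRepl_step _ _ _ _ (by simp [pvT2, pvT4, List.isPrefixOf]),
      pvRepl_push _ _ _ _ (by simp [pvT4])]
  rfl
theorem pvPass34 (X : List Char) :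
    pvRepl pvMac3 [' '] (pvMac4 ++ X) = pvMac4 ++ pvRepl pvMac3 [' '] X := by
  rw [pvMac4_cons, List.cons_append,
      pvMac3_cons, pvRepl_step _ _ _ _ (by simp [pvT3, pvT4, List.isPrefixOf]),
      pvRepl_push _ _ _ _ (by simp [pvT4])]
  rfl

-- pvScan on each kind of head
theorem pvScan_m1 (rest : List Char) : pvScan (pvMac1 ++ rest) = '.' :: pvScan rest := by
  rw [pvMac1_cons, List.cons_append, pvScan]
  have h1 : pvMac1.isPrefixOf ('\\' :: (pvT1 ++ rest)) = true :=
    List.isPrefixOf_iff_prefix.mpr ⟨rest, by rw [pvMac1_cons]; simp⟩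
  simp only [h1, if_pos]
  rw [show (13 : Nat) = pvT1.length from rfl, List.drop_left]
theorem pvScan_m2 (rest : List Char) : pvScan (pvMac2 ++ rest) = ' ' :: pvScan rest := by
  rw [pvMac2_cons, List.cons_append, pvScan]
  have h1 : pvMac1.isPrefixOf ('\\' :: (pvT2 ++ rest)) = false := by
    rw [pvMac1_cons]; simp [pvT1, pvT2, List.isPrefixOf]
  have h2 : pvMac2.isPrefixOf ('\\' :: (pvT2 ++ rest)) = true :=
    List.isPrefixOf_iff_prefix.mpr ⟨rest, by rw [pvMac2_cons]; simp⟩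
  simp only [h1, Bool.false_eq_true, if_false, h2, if_pos]
  rw [show (13 : Nat) = pvT2.length from rfl, List.drop_left]
theorem pvScan_m3 (rest : List Char) : pvScan (pvMac3 ++ rest) = ' ' :: pvScan rest := by
  rw [pvMac3_cons, List.cons_append, pvScan]
  have h1 : pvMac1.isPrefixOf ('\\' :: (pvT3 ++ rest)) = false := by
    rw [pvMac1_cons]; simp [pvT1, pvT3, List.isPrefixOf]
  have h2 : pvMac2.isPrefixOf ('\\' :: (pvT3 ++ rest)) = false := by
    rw [pvMac2_cons]; simp [pvT2, pvT3, List.isPrefixOf]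
  have h3 : pvMac3.isPrefixOf ('\\' :: (pvT3 ++ rest)) = true :=
    List.isPrefixOf_iff_prefix.mpr ⟨rest, by rw [pvMac3_cons]; simp⟩
  simp only [h1, h2, Bool.false_eq_true, if_false, h3, if_pos]
  rw [show (12 : Nat) = pvT3.length from rfl, List.drop_left]
theorem pvScan_m4 (rest : List Char) : pvScan (pvMac4 ++ rest) = '-' :: pvScan rest := by
  rw [pvMac4_cons, List.cons_append, pvScan]
  have h1 : pvMac1.isPrefixOf ('\\' :: (pvT4 ++ rest)) = false := by
    rw [pvMac1_cons]; simp [pvT1, pvT4, List.isPrefixOf]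
  have h2 : pvMac2.isPrefixOf ('\\' :: (pvT4 ++ rest)) = false := by
    rw [pvMac2_cons]; simp [pvT2, pvT4, List.isPrefixOf]
  have h3 : pvMac3.isPrefixOf ('\\' :: (pvT4 ++ rest)) = false := by
    rw [pvMac3_cons]; simp [pvT3, pvT4, List.isPrefixOf]
  have h4 : pvMac4.isPrefixOf ('\\' :: (pvT4 ++ rest)) = true :=
    List.isPrefixOf_iff_prefix.mpr ⟨rest, by rw [pvMac4_cons]; simp⟩
  simp only [h1, h2, h3, Bool.false_eq_true, if_false, h4, if_pos]
  rw [show (18 : Nat) = pvT4.length from rfl, List.drop_left]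

-- the chained passes equal the single scan
theorem pvChain_aux : ∀ (n : Nat) (l : List Char), l.length ≤ n →
    pvR4 (pvR3 (pvR2 (pvR1 l))) = pvScan l := by
  intro n
  induction n with
  | zero =>
    intro l h
    have : l = [] := by cases l <;> simp_all
    subst this
    simp [pvR1, pvR2, pvR3, pvR4, pvRepl, pvScan]
  | succ n ih =>
    intro l hlen
    cases l with
    | nil => simp [pvR1, pvR2, pvR3, pvR4, pvRepl, pvScan]
    | cons c t =>
      simp only [pvR1, pvR2, pvR3, pvR4] at *
      by_cases hc : c = '\\'
      · subst hc
        by_cases h1 : pvMac1.isPrefixOf ('\\' :: t) = true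
        · obtain ⟨rest, hrest⟩ := List.isPrefixOf_iff_prefix.mp h1
          rw [← hrest] at hlen ⊢
          have hr : rest.length ≤ n := by
            rw [List.length_append] at hlen
            simp [pvMac1] at hlen; omega
          rw [pvRepl_match _ _ _ (by decide), List.singleton_append,
              pvStep2 _ _ (by decide), pvStep3 _ _ (by decide), pvStep4 _ _ (by decide),
              pvScan_m1]
          exact congrArg _ (ih rest hr)
        · by_cases h2 : pvMac2.isPrefixOf ('\\' :: t) = true
          · obtain ⟨rest, hrest⟩ := List.isPrefixOf_iff_prefix.mp h2
            rw [← hrest] at hlen ⊢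
            have hr : rest.length ≤ n := by
              rw [List.length_append] at hlen
              simp [pvMac2] at hlen; omega
            rw [pvPass12, pvRepl_match _ _ _ (by decide), List.singleton_append,
                pvStep3 _ _ (by decide), pvStep4 _ _ (by decide), pvScan_m2]
            exact congrArg _ (ih rest hr)
          · by_cases h3 : pvMac3.isPrefixOf ('\\' :: t) = true
            · obtain ⟨rest, hrest⟩ := List.isPrefixOf_iff_prefix.mp h3
              rw [← hrest] at hlen ⊢
              have hr : rest.length ≤ n := by
                rw [List.length_append] at hlen
                simp [pvMac3] at hlen; omega
              rw [pvPass13, pvPass23, pvRepl_match _ _ _ (by decide), List.singleton_append,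
                  pvStep4 _ _ (by decide), pvScan_m3]
              exact congrArg _ (ih rest hr)
            · by_cases h4 : pvMac4.isPrefixOf ('\\' :: t) = true
              · obtain ⟨rest, hrest⟩ := List.isPrefixOf_iff_prefix.mp h4
                rw [← hrest] at hlen ⊢
                have hr : rest.length ≤ n := by
                  rw [List.length_append] at hlen
                  simp [pvMac4] at hlen; omega
                rw [pvPass14, pvPass24, pvPass34, pvRepl_match _ _ _ (by decide),
                    List.singleton_append, pvScan_m4]
                exact congrArg _ (ih rest hr)
              · -- backslash but no macro matches: all passes step over it
                have h1f := Bool.eq_false_iff.mpr h1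
                have h2f := Bool.eq_false_iff.mpr h2
                have h3f := Bool.eq_false_iff.mpr h3
                have h4f := Bool.eq_false_iff.mpr h4
                have h2t : pvT2.isPrefixOf t = false := by
                  rw [pvMac2_cons] at h2f; simpa [List.isPrefixOf] using h2f
                have h3t : pvT3.isPrefixOf t = false := by
                  rw [pvMac3_cons] at h3f; simpa [List.isPrefixOf] using h3f
                have h4t : pvT4.isPrefixOf t = false := by
                  rw [pvMac4_cons] at h4f; simpa [List.isPrefixOf] using h4f
                -- the earlier passes cannot create those macros after the backslash
                have p2 : pvT2.isPrefixOf (pvRepl pvMac1 ['.'] t) = false := by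
                  refine Bool.eq_false_iff.mpr (fun htr => ?_)
                  have := pvRepl_pfx pvT1 '.' t pvT2 (by decide) (by decide)
                    (by rw [← pvMac1_cons]; exact htr)
                  rw [h2t] at this; exact Bool.false_ne_true this
                have p3 : pvT3.isPrefixOf (pvRepl pvMac2 [' '] (pvRepl pvMac1 ['.'] t)) = false := by
                  refine Bool.eq_false_iff.mpr (fun htr => ?_)
                  have s1 := pvRepl_pfx pvT2 ' ' _ pvT3 (by decide) (by decide)
                    (by rw [← pvMac2_cons]; exact htr)
                  have s2 := pvRepl_pfx pvT1 '.' t pvT3 (by decide) (by decide)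
                    (by rw [← pvMac1_cons]; exact s1)
                  rw [h3t] at s2; exact Bool.false_ne_true s2
                have p4 : pvT4.isPrefixOf
                    (pvRepl pvMac3 [' '] (pvRepl pvMac2 [' '] (pvRepl pvMac1 ['.'] t))) = false := by
                  refine Bool.eq_false_iff.mpr (fun htr => ?_)
                  have s1 := pvRepl_pfx pvT3 ' ' _ pvT4 (by decide) (by decide)
                    (by rw [← pvMac3_cons]; exact htr)
                  have s2 := pvRepl_pfx pvT2 ' ' _ pvT4 (by decide) (by decide)
                    (by rw [← pvMac2_cons]; exact s1)
                  have s3 := pvRepl_pfx pvT1 '.' t pvT4 (by decide) (by decide)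
                    (by rw [← pvMac1_cons]; exact s2)
                  rw [h4t] at s3; exact Bool.false_ne_true s3
                have ht : t.length ≤ n := by simp at hlen; omega
                rw [pvRepl_step _ _ _ _ h1f,
                    pvRepl_step _ _ _ _ (by rw [pvMac2_cons]; simp [List.isPrefixOf, p2]),
                    pvRepl_step _ _ _ _ (by rw [pvMac3_cons]; simp [List.isPrefixOf, p3]),
                    pvRepl_step _ _ _ _ (by rw [pvMac4_cons]; simp [List.isPrefixOf, p4])]
                rw [pvScan]
                simp only [h1f, h2f, h3f, h4f, Bool.false_eq_true, if_false]
                exact congrArg _ (ih t ht)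
      · -- ordinary character: every pass and the scan copy it
        have ht : t.length ≤ n := by simp at hlen; omega
        rw [pvStep1 _ _ hc, pvStep2 _ _ hc, pvStep3 _ _ hc, pvStep4 _ _ hc, pvScan]
        simp only [hc, if_false]
        exact congrArg _ (ih t ht)

theorem pvChain_eq (l : List Char) : pvR4 (pvR3 (pvR2 (pvR1 l))) = pvScan l :=
  pvChain_aux l.length l le_rfl

-- ===== VERDICT (by name: the statement is the Claim_ definition above) =====
theorem preserve_tex_text_py_spec : Claim_equal_preserve_tex_text_py := by
  intro value _
  unfold Spec_preserve_tex_text_py preserve_tex_text_py preserve_tex_text_py_alt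
  simp only [List.foldl]
  rw [PySem.Str.replace, PySem.Str.toList_replace, PySem.Str.toList_replace,
      PySem.Str.toList_replace, PySem.Str.toList_strip]
  congr 1
  rw [pvReplace_eq _ _ _ (by decide), pvReplace_eq _ _ _ (by decide),
      pvReplace_eq _ _ _ (by decide), pvReplace_eq _ _ _ (by decide)]
  exact pvChain_eq _
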